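-- pv_equiv track=rewrite | github.com/W1ndR1dr/Forge | forge/github_health.py | _is_variant
-- ===== SOURCE A (Python) =====
-- def _is_variant(project: str, other: str) -> bool:
--     """Check if other is a variant of project (old, v2, ios, etc.)."""
--     variants = ["-old", "-new", "-v2", "-v1", "-ios", "-macos", "-app", "-cli"]
--
--     for variant in variants:
--         if other == project + variant or other == project.replace("-", "") + variant:
--             return True
--         if project == other + variant or project == other.replace("-", "") + variant:
--             return True
--
--     return False
-- ===== SOURCE B (Python) =====
-- def _is_variant(project: str, other: str) -> bool:
--     """Check if other is a variant of project (old, v2, ios, etc.)."""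
--     variants = {"-old", "-new", "-v2", "-v1", "-ios", "-macos", "-app", "-cli"}
--
--     # Every variant suffix starts with its only '-', so if target == base + v
--     # (or hyphen-stripped base + v) the variant's dash is the LAST dash in target:
--     # split target at its last dash and test the two halves.
--     def is_base_plus_variant(target: str, base: str) -> bool:
--         i = target.rfind("-")
--         return i >= 0 and target[i:] in variants and target[:i] in (base, base.replace("-", ""))
--
--     return is_base_plus_variant(other, project) or is_base_plus_variant(project, other)
-- ===== Notes on version B (the rewrite author's own statement) =====
-- stated objective: alternative
-- what changed: Eliminates A's per-variant construct-and-compare loop: B finds the LAST dash of the candidate string with rfind (valid because each variant suffix begins with its only dash), splits there once, and decides with one set-membership test on the suffix and one equality test of the stem against the base / hyphen-stripped base.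
import Mathlib
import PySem

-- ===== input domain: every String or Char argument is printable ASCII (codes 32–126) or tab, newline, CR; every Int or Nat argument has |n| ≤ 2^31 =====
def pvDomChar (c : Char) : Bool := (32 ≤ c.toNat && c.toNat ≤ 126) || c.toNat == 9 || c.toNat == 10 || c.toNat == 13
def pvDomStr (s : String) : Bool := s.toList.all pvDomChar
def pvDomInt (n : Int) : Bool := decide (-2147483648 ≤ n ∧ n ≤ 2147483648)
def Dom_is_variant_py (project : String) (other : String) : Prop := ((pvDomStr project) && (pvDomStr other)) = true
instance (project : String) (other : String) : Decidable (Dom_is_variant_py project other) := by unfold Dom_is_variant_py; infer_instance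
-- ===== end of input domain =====

-- B drops A's per-variant construct-and-compare loop: it splits the candidate at its LAST dash (rfind) and decides by one suffix set-membership plus one stem comparison.

-- ===== PORT A =====
def pvVariantsA : List (List Char) :=
  ["-old".toList, "-new".toList, "-v2".toList, "-v1".toList,
   "-ios".toList, "-macos".toList, "-app".toList, "-cli".toList]

-- the 'for variant in variants' loop with its early returns
def pvLoopA (project other : List Char) : List (List Char) → Bool
  | [] => false
  | v :: rest =>
    if other == project ++ v || other == PySem.Chars.replace project ['-'] [] ++ v then true
    else if project == other ++ v || project == PySem.Chars.replace other ['-'] [] ++ v then true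
    else pvLoopA project other rest

def is_variant_py (project : String) (other : String) : Bool :=
  pvLoopA project.toList other.toList pvVariantsA

-- ===== PORT B =====
def pvVariantsB : PySem.Set (List Char) :=
  PySem.Set.ofList ["-old".toList, "-new".toList, "-v2".toList, "-v1".toList,
                    "-ios".toList, "-macos".toList, "-app".toList, "-cli".toList]

-- is_base_plus_variant(target, base): split target at its last '-' (rfind), test the halves
def pvIsBasePlusVariant (target base : List Char) : Bool :=
  let i := PySem.Chars.rfind target ['-']
  decide (0 ≤ i) &&
    PySem.Set.contains pvVariantsB (PySem.List.slice target (some i) none) &&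
    (PySem.List.slice target none (some i) == base ||
     PySem.List.slice target none (some i) == PySem.Chars.replace base ['-'] [])

def is_variant_py_alt (project : String) (other : String) : Bool :=
  pvIsBasePlusVariant other.toList project.toList ||
  pvIsBasePlusVariant project.toList other.toList

-- ===== PRECONDITION & SPEC =====
def Spec_is_variant_py (project : String) (other : String) (out : Bool) : Prop := out = is_variant_py_alt project other
instance (project : String) (other : String) (out : Bool) : Decidable (Spec_is_variant_py project other out) := by unfold Spec_is_variant_py; infer_instance

-- ===== CLAIM (what is proved, stated in full; the proofs are below) =====
def Claim_equal_is_variant_py : Prop := ∀ (project : String) (other : String), Dom_is_variant_py project other → Spec_is_variant_py project other (is_variant_py project other)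

-- ===== LEMMAS AND PROOFS =====

-- characterisation of A's loop
theorem pv_loopA_iff (p o : List Char) (vs : List (List Char)) :
    pvLoopA p o vs = true ↔
      ∃ v ∈ vs, (o = p ++ v ∨ o = PySem.Chars.replace p ['-'] [] ++ v ∨
                 p = o ++ v ∨ p = PySem.Chars.replace o ['-'] [] ++ v) := by
  induction vs with
  | nil => simp [pvLoopA]
  | cons v rest ih =>
    simp only [pvLoopA, List.mem_cons]
    by_cases h1 : (o == p ++ v || o == PySem.Chars.replace p ['-'] [] ++ v) = true
    · rw [if_pos h1]
      simp only [beq_iff_eq, Bool.or_eq_true] at h1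
      exact ⟨fun _ => ⟨v, Or.inl rfl, by tauto⟩, fun _ => rfl⟩
    · rw [if_neg h1]
      by_cases h2 : (p == o ++ v || p == PySem.Chars.replace o ['-'] [] ++ v) = true
      · rw [if_pos h2]
        simp only [beq_iff_eq, Bool.or_eq_true] at h2
        exact ⟨fun _ => ⟨v, Or.inl rfl, by tauto⟩, fun _ => rfl⟩
      · rw [if_neg h2, ih]
        simp only [beq_iff_eq, Bool.or_eq_true, not_or] at h1 h2
        constructor
        · rintro ⟨w, hw, hd⟩; exact ⟨w, Or.inr hw, hd⟩
        · rintro ⟨w, hw | hw, hd⟩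
          · subst hw; tauto
          · exact ⟨w, hw, hd⟩

-- rfind.go tries indices k, k-1, …, 0: it returns i iff sub is a prefix at i and at no j with i < j ≤ k
theorem pv_go_spec (s sub : List Char) (k : Nat) :
    PySem.Chars.rfind.go s sub k = -1 ∨
    ∃ i : Nat, PySem.Chars.rfind.go s sub k = (i : Int) ∧ i ≤ k ∧
      sub <+: s.drop i ∧ ∀ j : Nat, i < j → j ≤ k → ¬ sub <+: s.drop j := by
  induction k with
  | zero =>
    by_cases h : sub.isPrefixOf s = true
    · exact Or.inr ⟨0, by simp [PySem.Chars.rfind.go, h], by omega,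
        by simpa using List.isPrefixOf_iff_prefix.mp h, fun j hj hj' => by omega⟩
    · exact Or.inl (by simp [PySem.Chars.rfind.go, h])
  | succ k ih =>
    by_cases h : sub.isPrefixOf (s.drop (k+1)) = true
    · refine Or.inr ⟨k+1, by simp [PySem.Chars.rfind.go, h], le_refl _,
        List.isPrefixOf_iff_prefix.mp h, fun j hj hj' => by omega⟩
    · have hgo : PySem.Chars.rfind.go s sub (k+1) = PySem.Chars.rfind.go s sub k := by
        simp [PySem.Chars.rfind.go, h]
      rcases ih with h1 | ⟨i, hi, hik, hpre, hmax⟩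
      · exact Or.inl (hgo ▸ h1)
      · refine Or.inr ⟨i, hgo ▸ hi, by omega, hpre, fun j hj hj' => ?_⟩
        rcases Nat.lt_or_ge j (k+1) with hlt | hge
        · exact hmax j hj (by omega)
        · have : j = k + 1 := by omega
          subst this
          exact fun hp => h (List.isPrefixOf_iff_prefix.mpr hp)

-- rfind.go is determined by 'greatest index with the prefix'
theorem pv_go_eq (s sub : List Char) (k i : Nat)
    (hik : i ≤ k) (hpre : sub <+: s.drop i)
    (hmax : ∀ j : Nat, i < j → j ≤ k → ¬ sub <+: s.drop j) :
    PySem.Chars.rfind.go s sub k = (i : Int) := by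
  induction k with
  | zero =>
    have : i = 0 := by omega
    subst this
    simp only [List.drop_zero] at hpre
    simp [PySem.Chars.rfind.go, List.isPrefixOf_iff_prefix.mpr hpre]
  | succ k ih =>
    rcases Nat.lt_or_ge i (k+1) with hlt | hge
    · have hnot : ¬ sub <+: s.drop (k+1) := hmax (k+1) (by omega) (le_refl _)
      have hfalse : sub.isPrefixOf (s.drop (k+1)) = false :=
        Bool.eq_false_iff.mpr (fun hb => hnot (List.isPrefixOf_iff_prefix.mp hb))
      simp only [PySem.Chars.rfind.go, hfalse]
      exact ih (by omega) (fun j hj hj' => hmax j hj (by omega))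
    · have : i = k + 1 := by omega
      subst this
      simp [PySem.Chars.rfind.go, List.isPrefixOf_iff_prefix.mpr hpre]

-- every variant starts with its only '-'
theorem pv_variants_shape : ∀ v ∈ pvVariantsA, ∃ w, v = '-' :: w ∧ '-' ∉ w := by
  intro v hv
  simp only [pvVariantsA, List.mem_cons, List.not_mem_nil, or_false] at hv
  rcases hv with rfl | rfl | rfl | rfl | rfl | rfl | rfl | rfl <;>
    exact ⟨_, rfl, by decide⟩

theorem pv_variantsB_mem (x : List Char) :
    PySem.Set.contains pvVariantsB x = true ↔ x ∈ pvVariantsA := by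
  rw [PySem.Set.contains_iff, pvVariantsB, PySem.Set.mem_ofList]
  rfl

-- the split-at-last-dash check equals 'some variant completes the base'
theorem pv_check_iff (t b : List Char) :
    pvIsBasePlusVariant t b = true ↔
      ∃ v ∈ pvVariantsA, (t = b ++ v ∨ t = PySem.Chars.replace b ['-'] [] ++ v) := by
  simp only [pvIsBasePlusVariant, PySem.Chars.rfind, Bool.and_eq_true, Bool.or_eq_true,
    decide_eq_true_eq, beq_iff_eq]
  constructor
  · rintro ⟨⟨hge, hmem⟩, hstem⟩
    rcases pv_go_spec t ['-'] t.length with hneg | ⟨i, hi, hik, hpre, _⟩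
    · rw [hneg] at hge; omega
    · rw [hi, PySem.List.slice_from_natCast] at hmem
      rw [hi, PySem.List.slice_to_natCast] at hstem
      refine ⟨t.drop i, (pv_variantsB_mem _).mp hmem, ?_⟩
      have hsplit : t = t.take i ++ t.drop i := (List.take_append_drop i t).symm
      rcases hstem with hstem | hstem
      · exact Or.inl (by conv_lhs => rw [hsplit, hstem]
                        )
      · exact Or.inr (by conv_lhs => rw [hsplit, hstem]
                        )
  · rintro ⟨v, hv, ht⟩
    obtain ⟨w, rfl, hw⟩ := pv_variants_shape v hv
    -- the base actually used ('b' or its dash-stripped form)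
    obtain ⟨b', rfl, hb'⟩ : ∃ b', t = b' ++ '-' :: w ∧
        (b' = b ∨ b' = PySem.Chars.replace b ['-'] []) := by
      rcases ht with ht | ht
      · exact ⟨b, ht, Or.inl rfl⟩
      · exact ⟨_, ht, Or.inr rfl⟩
    have hpre : ['-'] <+: (b' ++ '-' :: w).drop b'.length := by
      simp
    have hmax : ∀ j : Nat, b'.length < j → j ≤ (b' ++ '-' :: w).length →
        ¬ (['-'] : List Char) <+: (b' ++ '-' :: w).drop j := by
      intro j hj hj' hp
      obtain ⟨m, rfl⟩ : ∃ m, j = b'.length + (m + 1) := ⟨j - b'.length - 1, by omega⟩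
      have hmem : '-' ∈ (b' ++ '-' :: w).drop (b'.length + (m + 1)) := hp.mem (by simp)
      have h : '-' ∈ w.drop m := by simpa using hmem
      exact hw ((List.drop_suffix m w).subset h)
    have hrfind : PySem.Chars.rfind.go (b' ++ '-' :: w) ['-'] (b' ++ '-' :: w).length
        = (b'.length : Int) :=
      pv_go_eq _ _ _ _ (by simp) hpre hmax
    rw [hrfind]
    refine ⟨⟨Int.natCast_nonneg _, ?_⟩, ?_⟩
    · rw [PySem.List.slice_from_natCast, List.drop_left]
      exact (pv_variantsB_mem _).mpr (by simpa using hv)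
    · rw [PySem.List.slice_to_natCast, List.take_left]
      tauto

-- ===== VERDICT (by name: the statement is the Claim_ definition above) =====
theorem is_variant_py_spec : Claim_equal_is_variant_py := by
  intro project other _
  unfold Spec_is_variant_py
  rw [Bool.eq_iff_iff]
  unfold is_variant_py is_variant_py_alt
  rw [Bool.or_eq_true, pv_loopA_iff, pv_check_iff, pv_check_iff]
  constructor
  · rintro ⟨v, hv, h | h | h | h⟩
    · exact Or.inl ⟨v, hv, Or.inl h⟩
    · exact Or.inl ⟨v, hv, Or.inr h⟩
    · exact Or.inr ⟨v, hv, Or.inl h⟩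
    · exact Or.inr ⟨v, hv, Or.inr h⟩
  · rintro (⟨v, hv, h | h⟩ | ⟨v, hv, h | h⟩)
    · exact ⟨v, hv, Or.inl h⟩
    · exact ⟨v, hv, Or.inr (Or.inl h)⟩
    · exact ⟨v, hv, Or.inr (Or.inr (Or.inl h))⟩
    · exact ⟨v, hv, Or.inr (Or.inr (Or.inr h))⟩
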